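-- pv_equiv track=rewrite | github.com/AnshRaj112/CogniMarket | plot_training_loss.py | _metric_columns
-- ===== SOURCE A (Python) =====
-- from typing import Any, Dict, List, Sequence
--
-- def _metric_columns(columns: Sequence[str]) -> List[str]:
--     out: List[str] = []
--     for c in columns:
--         lc = c.lower()
--         if "loss" in lc or "reward" in lc:
--             out.append(c)
--     # Keep deterministic order and prioritize canonical keys first.
--     priority = {"loss": 0, "reward": 1}
--     return sorted(out, key=lambda x: (priority.get(x.lower(), 2), x.lower()))
-- ===== SOURCE B (Python) =====
-- from typing import Any, Dict, List, Sequence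
--
-- def _metric_columns(columns: Sequence[str]) -> List[str]:
--     losses: List[str] = []
--     rewards: List[str] = []
--     others: List[str] = []
--     for c in columns:
--         lc = c.lower()
--         if "loss" in lc or "reward" in lc:
--             if lc == "loss":
--                 losses.append(c)
--             elif lc == "reward":
--                 rewards.append(c)
--             else:
--                 others.append(c)
--     return losses + rewards + sorted(others, key=str.lower)
-- ===== Notes on version B (the rewrite author's own statement) =====
-- stated objective: simpler
-- what changed: Replaces the composite-key sort over the whole filtered list by a single-pass three-way bucket partition (canonical 'loss'/'reward' buckets kept in encounter order, mirroring the stable sort's tied keys) followed by one plain lowercase sort of the remaining bucket.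
import Mathlib
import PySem

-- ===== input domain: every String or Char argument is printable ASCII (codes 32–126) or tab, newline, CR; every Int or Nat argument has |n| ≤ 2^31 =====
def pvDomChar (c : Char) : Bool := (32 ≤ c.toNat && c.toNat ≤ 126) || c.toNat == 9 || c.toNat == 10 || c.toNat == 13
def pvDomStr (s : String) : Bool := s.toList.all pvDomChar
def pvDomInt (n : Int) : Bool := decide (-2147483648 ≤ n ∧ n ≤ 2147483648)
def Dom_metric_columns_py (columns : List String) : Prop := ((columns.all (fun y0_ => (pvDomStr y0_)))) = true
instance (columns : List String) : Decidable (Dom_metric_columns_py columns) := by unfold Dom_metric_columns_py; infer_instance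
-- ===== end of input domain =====

-- B replaces the composite-key stable sort by a one-pass three-way bucket partition
-- (canonical buckets in encounter order) plus one plain lowercase sort of the rest (objective: simpler).

-- ===== PORT A =====
def metric_columns_py (columns : List String) : List String :=
  let out : List String := columns.foldl (fun acc c =>
    let lc := PySem.Str.lower c
    if (PySem.Str.isIn "loss" lc || PySem.Str.isIn "reward" lc : Bool) then acc ++ [c] else acc) []
  let priority : PySem.Dict String Int :=
    ((PySem.Dict.empty : PySem.Dict String Int).insert "loss" 0).insert "reward" 1
  PySem.List.sorted2 out
    (fun x => priority.getD (PySem.Str.lower x) 2)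
    (fun x => PySem.Str.lower x)

-- ===== PORT B =====
def metric_columns_py_alt (columns : List String) : List String :=
  let t : List String × List String × List String := columns.foldl (fun acc c =>
    let lc := PySem.Str.lower c
    if (PySem.Str.isIn "loss" lc || PySem.Str.isIn "reward" lc : Bool) then
      if lc = "loss" then (acc.1 ++ [c], acc.2.1, acc.2.2)
      else if lc = "reward" then (acc.1, acc.2.1 ++ [c], acc.2.2)
      else (acc.1, acc.2.1, acc.2.2 ++ [c])
    else acc) ([], [], [])
  t.1 ++ t.2.1 ++ PySem.List.sorted t.2.2 (fun x => PySem.Str.lower x)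

-- ===== PRECONDITION & SPEC =====
def Spec_metric_columns_py (columns : List String) (out : List String) : Prop := out = metric_columns_py_alt columns
instance (columns : List String) (out : List String) : Decidable (Spec_metric_columns_py columns out) := by unfold Spec_metric_columns_py; infer_instance

-- ===== CLAIM (what is proved, stated in full; the proofs are below) =====
def Claim_equal_metric_columns_py : Prop := ∀ (columns : List String), Dom_metric_columns_py columns → Spec_metric_columns_py columns (metric_columns_py columns)

-- ===== LEMMAS AND PROOFS =====

-- abbreviations for the functions both ports use
def pvLow (x : String) : String := PySem.Str.lower x
def pvP (c : String) : Bool := PySem.Str.isIn "loss" (pvLow c) || PySem.Str.isIn "reward" (pvLow c)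
def pvK1 (x : String) : Int :=
  (((PySem.Dict.empty : PySem.Dict String Int).insert "loss" 0).insert "reward" 1).getD (pvLow x) 2
-- A's composite-key comparison (the `lt` inside sorted2) and B's plain lowercase one
def pvB2 (a b : String) : Bool :=
  decide (pvK1 a < pvK1 b) || (!decide (pvK1 b < pvK1 a) && decide (pvLow a < pvLow b))
def pvBO (a b : String) : Bool := decide (pvLow a < pvLow b)

lemma pvK1_eq (x : String) :
    pvK1 x = if pvLow x = "loss" then 0 else if pvLow x = "reward" then 1 else 2 := by
  by_cases h1 : pvLow x = "loss"
  · simp [pvK1, h1, PySem.Dict.getD, PySem.Dict.get?, PySem.Dict.insert, PySem.Dict.empty]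
  · by_cases h2 : pvLow x = "reward"
    · simp [pvK1, h2, PySem.Dict.getD, PySem.Dict.get?, PySem.Dict.insert, PySem.Dict.empty,
        List.find?]
    · simp [pvK1, h1, h2, PySem.Dict.getD, PySem.Dict.get?, PySem.Dict.insert, PySem.Dict.empty,
        List.find?, (by simp [Ne.symm h1] : ("loss" == pvLow x) = false),
        (by simp [Ne.symm h2] : ("reward" == pvLow x) = false)]

-- generic insertBy facts
lemma insertBy_append_left {α : Type} (before : α → α → Bool) (x : α) (l r : List α)
    (h : ∀ y ∈ l, before x y = false) :
    PySem.List.insertBy before x (l ++ r) = l ++ PySem.List.insertBy before x r := by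
  induction l with
  | nil => simp
  | cons a l ih =>
    simp only [List.cons_append, PySem.List.insertBy, h a (by simp)]
    simp only [Bool.false_eq_true, if_false, List.cons.injEq, true_and]
    exact ih (fun y hy => h y (by simp [hy]))

lemma insertBy_all_before {α : Type} (before : α → α → Bool) (x : α) (r : List α)
    (h : ∀ y ∈ r, before x y = true) :
    PySem.List.insertBy before x r = x :: r := by
  cases r with
  | nil => rfl
  | cons a r => simp [PySem.List.insertBy, h a (by simp)]

lemma insertBy_congr {α : Type} (before before' : α → α → Bool) (x : α) (ys : List α)
    (h : ∀ y ∈ ys, before x y = before' x y) :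
    PySem.List.insertBy before x ys = PySem.List.insertBy before' x ys := by
  induction ys with
  | nil => rfl
  | cons a ys ih =>
    simp only [PySem.List.insertBy, h a (by simp)]
    rw [ih (fun y hy => h y (by simp [hy]))]

-- the stable composite-key insertion decomposes into the three buckets
lemma foldl_insert_decomp (xs : List String) :
    xs.foldl (fun acc x => PySem.List.insertBy pvB2 x acc) [] =
      xs.filter (fun c => pvLow c == "loss") ++ xs.filter (fun c => pvLow c == "reward")
        ++ PySem.List.sorted (xs.filter (fun c => !(pvLow c == "loss") && !(pvLow c == "reward")))
             (fun x => pvLow x) := by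
  induction xs using List.reverseRecOn with
  | nil => rfl
  | append_singleton ys x ih =>
    have memL : ∀ y ∈ ys.filter (fun c => pvLow c == "loss"), pvLow y = "loss" := by
      intro y hy; simpa using (List.of_mem_filter hy)
    have memR : ∀ y ∈ ys.filter (fun c => pvLow c == "reward"), pvLow y = "reward" := by
      intro y hy; simpa using (List.of_mem_filter hy)
    have memS : ∀ y ∈ PySem.List.sorted
        (ys.filter (fun c => !(pvLow c == "loss") && !(pvLow c == "reward"))) (fun x => pvLow x),
        pvLow y ≠ "loss" ∧ pvLow y ≠ "reward" := by
      intro y hy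
      have := (PySem.List.mem_sorted _ _ _ _).1 hy
      simpa using (List.of_mem_filter this)
    rw [List.foldl_append, List.foldl_cons, List.foldl_nil, ih]
    have sorted_app : ∀ (zs : List String) (z : String),
        PySem.List.sorted (zs ++ [z]) (fun x => pvLow x) =
          PySem.List.insertBy pvBO z (PySem.List.sorted zs (fun x => pvLow x)) := by
      intro zs z
      rw [PySem.List.sorted_eq_foldl_insertBy, PySem.List.sorted_eq_foldl_insertBy,
        List.foldl_append, List.foldl_cons, List.foldl_nil]
      rfl
    by_cases h1 : pvLow x = "loss"
    · rw [List.append_assoc, insertBy_append_left pvB2 x _ _ (by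
        intro y hy
        simp [pvB2, pvK1_eq, h1, memL y hy]),
        insertBy_all_before pvB2 x _ (by
          intro y hy
          rcases List.mem_append.1 hy with hy | hy
          · simp [pvB2, pvK1_eq, h1, memR y hy]
          · simp [pvB2, pvK1_eq, h1, (memS y hy).1, (memS y hy).2])]
      simp [List.filter_append, h1]
    · by_cases h2 : pvLow x = "reward"
      · rw [insertBy_append_left pvB2 x _ _ (by
          intro y hy
          rcases List.mem_append.1 hy with hy | hy
          · simp [pvB2, pvK1_eq, h2, memL y hy]
          · simp [pvB2, pvK1_eq, h2, memR y hy]),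
          insertBy_all_before pvB2 x _ (by
            intro y hy
            simp [pvB2, pvK1_eq, h2, (memS y hy).1, (memS y hy).2])]
        simp [List.filter_append, h2]
      · rw [insertBy_append_left pvB2 x _ _ (by
          intro y hy
          rcases List.mem_append.1 hy with hy | hy
          · simp [pvB2, pvK1_eq, h1, h2, memL y hy]
          · simp [pvB2, pvK1_eq, h1, h2, memR y hy]),
          insertBy_congr pvB2 pvBO x _ (by
            intro y hy
            simp [pvB2, pvBO, pvK1_eq, h1, h2, (memS y hy).1, (memS y hy).2])]
        simp [List.filter_append, h1, h2, sorted_app]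

-- A in terms of the decomposition
lemma out_eq (columns : List String) (acc : List String) :
    columns.foldl (fun acc c =>
      let lc := PySem.Str.lower c
      if (PySem.Str.isIn "loss" lc || PySem.Str.isIn "reward" lc : Bool) then acc ++ [c] else acc)
      acc = acc ++ columns.filter pvP := by
  induction columns generalizing acc with
  | nil => simp
  | cons c rest ih =>
    simp only [List.foldl_cons]
    by_cases hp : pvP c = true
    · rw [show (PySem.Str.isIn "loss" (PySem.Str.lower c)
          || PySem.Str.isIn "reward" (PySem.Str.lower c)) = true from hp]
      rw [if_pos rfl, ih, List.filter_cons, if_pos hp]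
      simp
    · rw [show (PySem.Str.isIn "loss" (PySem.Str.lower c)
          || PySem.Str.isIn "reward" (PySem.Str.lower c)) = false from Bool.eq_false_iff.mpr hp]
      rw [if_neg (by simp), ih, List.filter_cons, if_neg hp]

lemma A_eq (columns : List String) :
    metric_columns_py columns =
      (columns.filter pvP).foldl (fun acc x => PySem.List.insertBy pvB2 x acc) [] := by
  unfold metric_columns_py
  rw [out_eq columns []]
  rfl

-- B's three-bucket fold, characterised by filters
lemma B_fold (columns : List String) (L R S : List String) :
    columns.foldl (fun acc c =>
      let lc := PySem.Str.lower c
      if (PySem.Str.isIn "loss" lc || PySem.Str.isIn "reward" lc : Bool) then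
        if lc = "loss" then (acc.1 ++ [c], acc.2.1, acc.2.2)
        else if lc = "reward" then (acc.1, acc.2.1 ++ [c], acc.2.2)
        else (acc.1, acc.2.1, acc.2.2 ++ [c])
      else acc) (L, R, S) =
    (L ++ columns.filter (fun c => pvLow c == "loss"),
     R ++ columns.filter (fun c => pvLow c == "reward"),
     S ++ columns.filter (fun c => pvP c && !(pvLow c == "loss") && !(pvLow c == "reward"))) := by
  induction columns generalizing L R S with
  | nil => simp
  | cons c rest ih =>
    simp only [List.foldl_cons]
    by_cases h1 : pvLow c = "loss"
    · rw [show (PySem.Str.isIn "loss" (PySem.Str.lower c)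
          || PySem.Str.isIn "reward" (PySem.Str.lower c)) = true from by
        unfold pvP at *; rw [show PySem.Str.lower c = "loss" from h1]; decide]
      rw [if_pos rfl, if_pos (show PySem.Str.lower c = "loss" from h1), ih]
      simp [h1, List.append_assoc]
    · by_cases h2 : pvLow c = "reward"
      · rw [show (PySem.Str.isIn "loss" (PySem.Str.lower c)
            || PySem.Str.isIn "reward" (PySem.Str.lower c)) = true from by
          unfold pvP at *; rw [show PySem.Str.lower c = "reward" from h2]; decide]
        rw [if_pos rfl, if_neg (show ¬ PySem.Str.lower c = "loss" from h1),
          if_pos (show PySem.Str.lower c = "reward" from h2), ih]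
        simp [h2, List.append_assoc]
      · by_cases hp : pvP c = true
        · rw [show (PySem.Str.isIn "loss" (PySem.Str.lower c)
              || PySem.Str.isIn "reward" (PySem.Str.lower c)) = true from hp]
          rw [if_pos rfl, if_neg (show ¬ PySem.Str.lower c = "loss" from h1),
            if_neg (show ¬ PySem.Str.lower c = "reward" from h2), ih]
          simp [h1, h2, hp, List.append_assoc]
        · rw [show (PySem.Str.isIn "loss" (PySem.Str.lower c)
              || PySem.Str.isIn "reward" (PySem.Str.lower c)) = false from Bool.eq_false_iff.mpr hp]
          rw [if_neg (by simp), ih]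
          have hp' : pvP c = false := Bool.eq_false_iff.mpr hp
          simp [h1, h2, hp']

-- filters agree: a column with lowercase "loss"/"reward" always passes the substring test
lemma filter_canon_loss (columns : List String) :
    (columns.filter pvP).filter (fun c => pvLow c == "loss") =
      columns.filter (fun c => pvLow c == "loss") := by
  rw [List.filter_filter]
  apply List.filter_congr
  intro c _
  by_cases h : pvLow c = "loss"
  · have hp : pvP c = true := by unfold pvP; rw [h]; decide
    simp [hp, h]
  · simp [h]

lemma filter_canon_reward (columns : List String) :
    (columns.filter pvP).filter (fun c => pvLow c == "reward") =
      columns.filter (fun c => pvLow c == "reward") := by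
  rw [List.filter_filter]
  apply List.filter_congr
  intro c _
  by_cases h : pvLow c = "reward"
  · have hp : pvP c = true := by unfold pvP; rw [h]; decide
    simp [hp, h]
  · simp [h]

lemma filter_other (columns : List String) :
    (columns.filter pvP).filter (fun c => !(pvLow c == "loss") && !(pvLow c == "reward")) =
      columns.filter (fun c => pvP c && !(pvLow c == "loss") && !(pvLow c == "reward")) := by
  rw [List.filter_filter]
  apply List.filter_congr
  intro c _
  by_cases h1 : pvLow c = "loss" <;> by_cases h2 : pvLow c = "reward" <;>
    cases hp : pvP c <;> simp [h1, h2]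

-- ===== VERDICT (by name: the statement is the Claim_ definition above) =====
theorem metric_columns_py_spec : Claim_equal_metric_columns_py := by
  intro columns _
  unfold Spec_metric_columns_py
  rw [A_eq, foldl_insert_decomp, filter_canon_loss, filter_canon_reward, filter_other]
  unfold metric_columns_py_alt
  rw [B_fold columns [] [] []]
  simp [pvLow]
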